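-- pv_equiv track=rewrite | github.com/hangqiu/AutoCastSim | AVR/HUD.py | gradient_color_based_on_index
-- ===== SOURCE A (Python) =====
-- def gradient_color_based_on_index(sampled_waypoints):
--     R = 0
--     G = 255
--     B = 0
--     delta = 10
--     G2B = True
--     color_output = []
--     for index, point in enumerate(sampled_waypoints):
--         if G == 0:
--             G2B = False
--         if B == 0:
--             G2B = True
--         if G2B:
--             G = max(0, G - delta)
--             B = min(255, B + delta)
--         else:
--             G = min(255, G + delta)
--             B = max(0, B - delta)
--         color_output.append([R, G, B])
--     return color_output
-- ===== SOURCE B (Python) =====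
-- def gradient_color_based_on_index(sampled_waypoints):
--     # The color only depends on the position: G is a triangle wave of period
--     # 52, R is always 0 and B is always 255 - G, so compute each row directly.
--     color_output = []
--     for i, _ in enumerate(sampled_waypoints):
--         t = i % 52
--         if t < 26:
--             G = max(0, 245 - 10 * t)
--         else:
--             G = min(255, 10 * (t - 25))
--         color_output.append([0, G, 255 - G])
--     return color_output
-- ===== Notes on version B (the rewrite author's own statement) =====
-- stated objective: simpler
-- what changed: Replaced the stateful direction-flag machine (G/B accumulators plus a G2B toggle carried across iterations) by a closed-form per-index formula: G is a clamped triangle wave of period 52 in the index, R=0 and B=255-G.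
import Mathlib
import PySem

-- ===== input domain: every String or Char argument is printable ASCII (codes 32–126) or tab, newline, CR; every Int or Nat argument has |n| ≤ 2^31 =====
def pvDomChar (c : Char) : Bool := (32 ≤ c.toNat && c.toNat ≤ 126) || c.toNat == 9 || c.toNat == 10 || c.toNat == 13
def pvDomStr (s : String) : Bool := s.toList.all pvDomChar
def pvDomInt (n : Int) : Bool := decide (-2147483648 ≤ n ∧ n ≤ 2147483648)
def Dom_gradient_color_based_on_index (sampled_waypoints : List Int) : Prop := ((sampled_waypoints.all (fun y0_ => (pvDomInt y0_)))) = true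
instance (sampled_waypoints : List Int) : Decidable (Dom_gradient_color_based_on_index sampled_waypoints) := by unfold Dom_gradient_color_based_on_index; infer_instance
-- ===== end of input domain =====

-- B replaces A's stateful G/B/G2B machine by a closed-form per-index triangle wave (simpler).

-- ===== PORT A =====
-- The loop carries state (G, B, G2B); index and point are never used, so the
-- loop over `enumerate(sampled_waypoints)` is the obvious structural recursion
-- over the list with that state.
def gradientGoA (rest : List Int) (G B : Int) (g2b : Bool) : List (List Int) :=
  match rest with
  | [] => []
  | _ :: rest =>
    let g2b := if G = 0 then false else g2b
    let g2b := if B = 0 then true else g2b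
    if g2b then
      let G := max 0 (G - 10)
      let B := min 255 (B + 10)
      [0, G, B] :: gradientGoA rest G B g2b
    else
      let G := min 255 (G + 10)
      let B := max 0 (B - 10)
      [0, G, B] :: gradientGoA rest G B g2b

def gradient_color_based_on_index (sampled_waypoints : List Int) : List (List Int) :=
  gradientGoA sampled_waypoints 255 0 true

-- ===== PORT B =====
def gradientRow (i : Int) : List Int :=
  let t := PySem.Int.mod i 52
  let G : Int := if t < 26 then max 0 (245 - 10 * t) else min 255 (10 * (t - 25))
  [0, G, 255 - G]

def gradient_color_based_on_index_alt (sampled_waypoints : List Int) : List (List Int) :=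
  (PySem.List.enumerate sampled_waypoints).map (fun p => gradientRow p.1)

-- ===== PRECONDITION & SPEC =====
def Spec_gradient_color_based_on_index (sampled_waypoints : List Int) (out : List (List Int)) : Prop := out = gradient_color_based_on_index_alt sampled_waypoints
instance (sampled_waypoints : List Int) (out : List (List Int)) : Decidable (Spec_gradient_color_based_on_index sampled_waypoints out) := by unfold Spec_gradient_color_based_on_index; infer_instance

-- ===== CLAIM (what is proved, stated in full; the proofs are below) =====
def Claim_equal_gradient_color_based_on_index : Prop := ∀ (sampled_waypoints : List Int), Dom_gradient_color_based_on_index sampled_waypoints → Spec_gradient_color_based_on_index sampled_waypoints (gradient_color_based_on_index sampled_waypoints)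

-- ===== LEMMAS AND PROOFS =====

-- closed form of the G component of A's state entering iteration i, as a function of t = i % 52
def gradientGT (t : Int) : Int := if t ≤ 25 then 255 - 10 * t else 10 * (t - 26)

lemma gradientGoA_spec (xs : List Int) : ∀ (i : Int) (flag : Bool), 0 ≤ i →
    (i % 52 ≠ 0 → i % 52 ≠ 26 → flag = decide (i % 52 < 26)) →
    gradientGoA xs (gradientGT (i % 52)) (255 - gradientGT (i % 52)) flag
      = (PySem.List.enumerate xs i).map (fun p => gradientRow p.1) := by
  induction xs with
  | nil => intro i flag _ _; simp [gradientGoA, PySem.List.enumerate_nil]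
  | cons x xs ih =>
    intro i flag hi hf
    have ht0 : 0 ≤ i % 52 := by omega
    have ht : i % 52 < 52 := by omega
    set t := i % 52 with htdef
    have hG0 : gradientGT t = 0 ↔ t = 26 := by unfold gradientGT; split_ifs <;> omega
    have hB0 : 255 - gradientGT t = 0 ↔ t = 0 := by unfold gradientGT; split_ifs <;> omega
    have hsucc : (i + 1) % 52 = if t = 51 then 0 else t + 1 := by
      split_ifs <;> omega
    have hg2b2 : (if 255 - gradientGT t = 0 then true
        else if gradientGT t = 0 then false else flag) = decide (t < 26) := by
      by_cases h0 : t = 0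
      · rw [if_pos (hB0.mpr h0)]; simp [h0]
      · by_cases h26 : t = 26
        · rw [if_neg (fun h => h0 (hB0.mp h)), if_pos (hG0.mpr h26)]; simp [h26]
        · rw [if_neg (fun h => h0 (hB0.mp h)), if_neg (fun h => h26 (hG0.mp h)), hf h0 h26]
    have hmod : PySem.Int.mod i 52 = t := PySem.Int.mod_eq_emod_of_pos (by omega)
    simp only [gradientGoA, hg2b2, PySem.List.enumerate_cons, List.map_cons]
    have hflag' : (i + 1) % 52 ≠ 0 → (i + 1) % 52 ≠ 26 →
        (decide (t < 26)) = decide ((i + 1) % 52 < 26) := by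
      intro h1 h2
      rw [hsucc] at h1 h2 ⊢
      simp only [decide_eq_decide]
      split_ifs at h1 h2 ⊢ <;> omega
    by_cases hlt : t < 26
    · have hG' : max 0 (gradientGT t - 10) = gradientGT ((i + 1) % 52) := by
        rw [hsucc]; unfold gradientGT; split_ifs <;> omega
      have hB' : min 255 (255 - gradientGT t + 10) = 255 - gradientGT ((i + 1) % 52) := by
        rw [hsucc]; unfold gradientGT; split_ifs <;> omega
      have hrow : gradientRow i = [0, max 0 (gradientGT t - 10), min 255 (255 - gradientGT t + 10)] := by
        unfold gradientRow gradientGT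
        simp only [hmod]
        split_ifs <;> simp <;> omega
      rw [if_pos (by simp [hlt] : decide (t < 26) = true), hrow, hG', hB']
      exact congrArg (List.cons _) (ih (i + 1) _ (by omega) hflag')
    · have hG' : min 255 (gradientGT t + 10) = gradientGT ((i + 1) % 52) := by
        rw [hsucc]; unfold gradientGT; split_ifs <;> omega
      have hB' : max 0 (255 - gradientGT t - 10) = 255 - gradientGT ((i + 1) % 52) := by
        rw [hsucc]; unfold gradientGT; split_ifs <;> omega
      have hrow : gradientRow i = [0, min 255 (gradientGT t + 10), max 0 (255 - gradientGT t - 10)] := by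
        unfold gradientRow gradientGT
        simp only [hmod]
        split_ifs <;> simp <;> omega
      rw [if_neg (by simp [hlt] : ¬ decide (t < 26) = true), hrow, hG', hB']
      exact congrArg (List.cons _) (ih (i + 1) _ (by omega) hflag')

-- ===== VERDICT (by name: the statement is the Claim_ definition above) =====
theorem gradient_color_based_on_index_spec : Claim_equal_gradient_color_based_on_index := by
  intro xs _
  unfold Spec_gradient_color_based_on_index gradient_color_based_on_index gradient_color_based_on_index_alt
  have h := gradientGoA_spec xs 0 true (by omega) (by intro h; simp at h)
  simpa [gradientGT] using h
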